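-- pv_equiv track=rewrite | github.com/aulb/api_maze_solver | utils.py | decode_path_solution
-- ===== SOURCE A (Python) =====
-- def position_to_object(position):
-- 	"""
-- 	Small utility function to convert a position to the specified object.
-- 	Example: (1, 2) -> {'x': 1, 'y': 2}
-- 	"""
-- 	x, y = position
-- 	return {'x': x, 'y': y}
--
-- def decode_path_solution(start, path):
-- 	"""
-- 	Translates a path into a solution that the server accepts.
-- 	Example: (0, 0), 'SE' -> [{'x': 0, 'y': 0}, {'x': 1, 'y': 0}, {'x': 1, 'y': 1}]
-- 	"""
-- 	if not path: return []
-- 	solution = [position_to_object(start)]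
-- 	for direction in path:
-- 		current_position = solution[-1]
-- 		x, y = current_position['x'], current_position['y']
-- 		if direction == 'N':
-- 			solution.append(position_to_object((x - 1, y)))
-- 		elif direction == 'S':
-- 			solution.append(position_to_object((x + 1, y)))
-- 		elif direction == 'W':
-- 			solution.append(position_to_object((x, y - 1)))
-- 		else:
-- 			solution.append(position_to_object((x, y + 1)))
-- 	return solution
-- ===== SOURCE B (Python) =====
-- DELTAS = {'N': (-1, 0), 'S': (1, 0), 'W': (0, -1)}
--
--
-- def prefix_positions(v0, deltas):
--     """Running values v0, v0+d0, v0+d0+d1, ... as a list (scalar accumulator)."""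
--     out = [v0]
--     for d in deltas:
--         v0 += d
--         out.append(v0)
--     return out
--
--
-- def decode_path_solution(start, path):
--     if not path:
--         return []
--     deltas = [DELTAS.get(c, (0, 1)) for c in path]
--     xs = prefix_positions(start[0], [d[0] for d in deltas])
--     ys = prefix_positions(start[1], [d[1] for d in deltas])
--     return [{'x': x, 'y': y} for x, y in zip(xs, ys)]
-- ===== Notes on version B (the rewrite author's own statement) =====
-- stated objective: alternative
-- what changed: A runs one loop over the path that appends to a list of dicts and re-reads solution[-1] each step; B is staged: map the path to a delta list via a direction table (default (0,1) for the E catch-all), compute the x- and y-coordinate sequences independently as scalar prefix sums, then zip the two sequences and build the dicts in a final pass.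
import Mathlib
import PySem

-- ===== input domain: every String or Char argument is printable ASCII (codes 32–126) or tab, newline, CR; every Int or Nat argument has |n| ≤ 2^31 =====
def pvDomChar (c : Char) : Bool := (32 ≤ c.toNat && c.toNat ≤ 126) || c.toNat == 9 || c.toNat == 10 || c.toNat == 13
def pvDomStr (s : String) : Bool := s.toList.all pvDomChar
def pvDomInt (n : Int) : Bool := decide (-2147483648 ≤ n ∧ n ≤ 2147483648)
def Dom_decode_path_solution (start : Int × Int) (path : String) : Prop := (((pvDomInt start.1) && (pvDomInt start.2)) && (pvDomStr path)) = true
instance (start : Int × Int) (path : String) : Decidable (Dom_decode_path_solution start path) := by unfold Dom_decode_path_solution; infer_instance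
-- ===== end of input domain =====

-- B replaces A's single loop over a list of dicts (re-reading solution[-1] each step) by staged
-- passes: map to deltas, two independent scalar prefix-sum passes per axis, zip, then dict build
-- (alternative decomposition, same cost).

-- ===== PORT A =====
def positionToObject (position : Int × Int) : List (String × Int) :=
  [("x", position.1), ("y", position.2)]

-- loop body of A's 'for direction in path'
def stepA (sol : List (List (String × Int))) (direction : Char) : List (List (String × Int)) :=
  let cur := (PySem.List.pyGet? sol (-1)).getD []          -- solution[-1]; sol is never empty here
  let x := ((PySem.Dict.mk cur).get? "x").getD 0           -- current_position['x']; key always present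
  let y := ((PySem.Dict.mk cur).get? "y").getD 0           -- current_position['y']; key always present
  if direction = 'N' then sol ++ [positionToObject (x - 1, y)]
  else if direction = 'S' then sol ++ [positionToObject (x + 1, y)]
  else if direction = 'W' then sol ++ [positionToObject (x, y - 1)]
  else sol ++ [positionToObject (x, y + 1)]

def decode_path_solution (start : Int × Int) (path : String) : List (List (String × Int)) :=
  if path.toList.isEmpty then []
  else path.toList.foldl stepA [positionToObject start]

-- ===== PORT B =====
-- DELTAS.get(c, (0, 1))
def deltaOf (c : Char) : Int × Int :=
  PySem.Dict.getD (PySem.Dict.mk [('N', ((-1 : Int), (0 : Int))), ('S', (1, 0)), ('W', (0, -1))]) c (0, 1)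

-- Source B's prefix_positions: scalar accumulator v0, list out
def prefixPositions (v0 : Int) (deltas : List Int) : List Int :=
  (deltas.foldl (fun (st : Int × List Int) d => (st.1 + d, st.2 ++ [st.1 + d])) (v0, [v0])).2

def decode_path_solution_alt (start : Int × Int) (path : String) : List (List (String × Int)) :=
  if path.toList.isEmpty then []
  else
    let deltas := path.toList.map deltaOf
    let xs := prefixPositions start.1 (deltas.map (·.1))
    let ys := prefixPositions start.2 (deltas.map (·.2))
    (xs.zip ys).map (fun p => [("x", p.1), ("y", p.2)])

-- ===== PRECONDITION & SPEC =====
def Spec_decode_path_solution (start : Int × Int) (path : String) (out : List (List (String × Int))) : Prop := out = decode_path_solution_alt start path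
instance (start : Int × Int) (path : String) (out : List (List (String × Int))) : Decidable (Spec_decode_path_solution start path out) := by unfold Spec_decode_path_solution; infer_instance

-- ===== CLAIM (what is proved, stated in full; the proofs are below) =====
def Claim_equal_decode_path_solution : Prop := ∀ (start : Int × Int) (path : String), Dom_decode_path_solution start path → Spec_decode_path_solution start path (decode_path_solution start path)

-- ===== LEMMAS AND PROOFS =====

-- the position sequence both sides produce, as a pair of scanls
def posSeq (cs : List Char) (x y : Int) : List (Int × Int) :=
  ((cs.map (fun c => (deltaOf c).1)).scanl (· + ·) x).zip
    ((cs.map (fun c => (deltaOf c).2)).scanl (· + ·) y)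

-- one step of A appends the position shifted by deltaOf
theorem stepA_append (R : List (List (String × Int))) (x y : Int) (c : Char) :
    stepA (R ++ [positionToObject (x, y)]) c
      = (R ++ [positionToObject (x, y)]) ++ [positionToObject (x + (deltaOf c).1, y + (deltaOf c).2)] := by
  have hlast : PySem.List.pyGet? (R ++ [positionToObject (x, y)]) (-1)
      = some (positionToObject (x, y)) := PySem.List.pyGet?_neg_one_append_singleton _ _
  simp only [stepA, hlast, Option.getD_some]
  by_cases hN : c = 'N'
  · simp [hN, deltaOf, positionToObject, PySem.Dict.getD, PySem.Dict.get?, List.find?, sub_eq_add_neg]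
  · by_cases hS : c = 'S'
    · simp [hS, deltaOf, positionToObject, PySem.Dict.getD, PySem.Dict.get?, List.find?]
    · by_cases hW : c = 'W'
      · simp [hW, deltaOf, positionToObject, PySem.Dict.getD, PySem.Dict.get?, List.find?, sub_eq_add_neg]
      · have h1 : ('N' == c) = false := by simp [Ne.symm hN]
        have h2 : ('S' == c) = false := by simp [Ne.symm hS]
        have h3 : ('W' == c) = false := by simp [Ne.symm hW]
        simp [hN, hS, hW, h1, h2, h3, deltaOf, positionToObject, PySem.Dict.getD,
          PySem.Dict.get?, List.find?]

-- A's loop produces exactly the position sequence, mapped to objects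
theorem foldA_eq_posSeq (cs : List Char) :
    ∀ (R : List (List (String × Int))) (x y : Int),
      List.foldl stepA (R ++ [positionToObject (x, y)]) cs
        = R ++ (posSeq cs x y).map positionToObject := by
  induction cs with
  | nil => intro R x y; simp [posSeq]
  | cons c cs ih =>
    intro R x y
    rw [List.foldl_cons, stepA_append,
      ih (R ++ [positionToObject (x, y)]) (x + (deltaOf c).1) (y + (deltaOf c).2)]
    simp [posSeq, List.scanl_cons]

-- Source B's scalar loop is a scanl, for any accumulated output
theorem prefixPositions_aux (ds : List Int) :
    ∀ (v : Int) (out : List Int),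
      (ds.foldl (fun (st : Int × List Int) d => (st.1 + d, st.2 ++ [st.1 + d])) (v, out)).2
        = out ++ (ds.scanl (· + ·) v).tail := by
  induction ds with
  | nil => intro v out; simp
  | cons d ds ih =>
    intro v out
    rw [List.foldl_cons, ih (v + d) (out ++ [v + d])]
    cases ds <;> simp [List.scanl_cons]

theorem prefixPositions_eq_scanl (v : Int) (ds : List Int) :
    prefixPositions v ds = ds.scanl (· + ·) v := by
  rw [prefixPositions, prefixPositions_aux ds v [v]]
  cases ds <;> simp [List.scanl_cons]

-- ===== VERDICT (by name: the statement is the Claim_ definition above) =====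
theorem decode_path_solution_spec : Claim_equal_decode_path_solution := by
  intro start path _
  unfold Spec_decode_path_solution decode_path_solution decode_path_solution_alt
  by_cases h : path.toList.isEmpty
  · simp [h]
  · simp only [h, if_neg, Bool.false_eq_true, not_false_eq_true]
    rw [show [positionToObject start] = [] ++ [positionToObject (start.1, start.2)] by simp,
      foldA_eq_posSeq, prefixPositions_eq_scanl, prefixPositions_eq_scanl]
    simp only [posSeq, List.map_map]
    rfl
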